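-- pv_equiv track=rewrite | github.com/RaduTulcan/Spatio-Temporal-Model-Checker | baseline_version/evaluator_baseline/SpatioTemporalEvaluator.py | generate_trace_from_spec
-- ===== SOURCE A (Python) =====
-- import copy
--
-- def generate_trace_from_spec(trace_spec: list[list[str]], grid_size: tuple[int, int]) -> list[list[list[list]]]:
--     """
--     Generates the trace data structure from the given trace model.
--
--     :param trace_spec: the trace specification
--     :param grid_size: the grid size used for the trace specification
--     :return: the trace data structure used in the baseline algorithms
--     """
--
--     empty_grid: list[list[list]] = [[[] for _ in range(0, grid_size[1])] for _ in range(0, grid_size[0])]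
--     trace_length: int = len(trace_spec[0][0].split(";"))
--     trace: list[list[list[list]]] = [copy.deepcopy(empty_grid) for _ in range(0, trace_length)]
--
--     # fills the empty trace according to the trace specification
--     for i in range(0, grid_size[0]):
--         for j in range(0, grid_size[1]):
--             point_time_evolution: list = trace_spec[i][j].split(";")
--
--             for k in range(0, trace_length):
--                 if point_time_evolution[k] == "":
--                     trace[k][i][j] = []
--                 else:
--                     trace[k][i][j] = point_time_evolution[k].split(",")
--     return trace
-- ===== SOURCE B (Python) =====
-- def _parse_cell(s: str) -> list:
--     """Single left-to-right character scan of one cell spec: builds the list of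
--     per-time-step atom lists directly, without calling str.split at all."""
--     layers = []
--     atoms = []
--     atom = []
--     empty = True
--     for ch in s:
--         if ch == ';':
--             layers = layers + [[] if empty else atoms + [''.join(atom)]]
--             atoms = []
--             atom = []
--             empty = True
--         elif ch == ',':
--             atoms = atoms + [''.join(atom)]
--             atom = []
--             empty = False
--         else:
--             atom = atom + [ch]
--             empty = False
--     layers = layers + [[] if empty else atoms + [''.join(atom)]]
--     return layers
--
--
-- def generate_trace_from_spec(trace_spec: list[list[str]], grid_size: tuple[int, int]) -> list[list[list[list]]]:
--     rows, cols = grid_size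
--     trace_length = trace_spec[0][0].count(';') + 1
--     parsed = [[_parse_cell(trace_spec[i][j]) for j in range(cols)] for i in range(rows)]
--     return [[[parsed[i][j][k] for j in range(cols)] for i in range(rows)]
--             for k in range(trace_length)]
-- ===== Notes on version B (the rewrite author's own statement) =====
-- stated objective: alternative
-- what changed: B never calls str.split and allocates no empty grid or deepcopy: each cell is parsed by a single left-to-right character-level state machine that emits the per-time-step atom lists directly, trace_length comes from count(';')+1, and the time-major result is assembled by indexing the parsed table.
import Mathlib
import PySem

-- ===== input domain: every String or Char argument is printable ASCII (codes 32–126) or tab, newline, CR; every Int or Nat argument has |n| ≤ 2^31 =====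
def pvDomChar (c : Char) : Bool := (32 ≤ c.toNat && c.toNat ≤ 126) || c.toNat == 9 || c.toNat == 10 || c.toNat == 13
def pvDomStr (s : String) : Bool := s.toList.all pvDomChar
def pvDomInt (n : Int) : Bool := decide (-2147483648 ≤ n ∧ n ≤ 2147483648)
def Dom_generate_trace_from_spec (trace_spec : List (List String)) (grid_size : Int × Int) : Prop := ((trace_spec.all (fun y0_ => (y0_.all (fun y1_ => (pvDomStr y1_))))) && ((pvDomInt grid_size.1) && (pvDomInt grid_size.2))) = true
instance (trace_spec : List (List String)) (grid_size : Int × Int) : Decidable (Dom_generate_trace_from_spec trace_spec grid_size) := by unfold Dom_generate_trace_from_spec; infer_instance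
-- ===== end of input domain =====

-- B replaces A's split-twice / empty-grid / deepcopy / in-place-assignment scheme by a single
-- left-to-right character-level state machine per cell (no split call at all, trace length from
-- count(';')+1) and a direct time-major assembly from the parsed table (alternative algorithm).


-- ===== PORT A =====
-- Literal transliteration of A. Reads of trace_spec[i][j] / pte[k] use pyGetD with a default:
-- Python raises there exactly when the index is out of range, and Pre_ excludes those inputs.
-- Assignments trace[k][i][j] = v are always in range in Python (the structure was pre-built),
-- so List.set with the (nonnegative, from range) index .toNat is exact.
def generate_trace_from_spec (trace_spec : List (List String)) (grid_size : Int × Int) : List (List (List (List String))) :=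
  let empty_grid : List (List (List String)) :=
    (PySem.List.pyRange 0 grid_size.1).map (fun _ =>
      (PySem.List.pyRange 0 grid_size.2).map (fun _ => ([] : List String)))
  let trace_length : Int :=
    (((PySem.Str.split? (PySem.List.pyGetD (PySem.List.pyGetD trace_spec 0 []) 0 "") ";").getD []).length : Int)
  let trace0 : List (List (List (List String))) :=
    (PySem.List.pyRange 0 trace_length).map (fun _ => empty_grid)
  (PySem.List.pyRange 0 grid_size.1).foldl (fun tr i =>
    (PySem.List.pyRange 0 grid_size.2).foldl (fun tr j =>
      let pte : List String :=
        (PySem.Str.split? (PySem.List.pyGetD (PySem.List.pyGetD trace_spec i []) j "") ";").getD []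
      (PySem.List.pyRange 0 trace_length).foldl (fun tr k =>
        let v : List String :=
          if PySem.List.pyGetD pte k "" = "" then []
          else (PySem.Str.split? (PySem.List.pyGetD pte k "") ",").getD []
        tr.set k.toNat ((PySem.List.pyGetD tr k []).set i.toNat
          ((PySem.List.pyGetD (PySem.List.pyGetD tr k []) i []).set j.toNat v))) tr) tr) trace0

-- ===== PORT B =====
-- Transliteration of Source B. _parse_cell's for-loop over the characters becomes the structural
-- recursion pvParseCellGo over the same four pieces of state; ''.join(atom) is String.ofList
-- (exact: atom is a plain list of the cell's characters).
def pvParseCellGo (s : List Char) (layers : List (List String)) (atoms : List String)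
    (atom : List Char) (empty : Bool) : List (List String) :=
  match s with
  | [] => layers ++ [if empty then [] else atoms ++ [String.ofList atom]]
  | ch :: rest =>
    if ch = ';' then
      pvParseCellGo rest (layers ++ [if empty then [] else atoms ++ [String.ofList atom]]) [] [] true
    else if ch = ',' then
      pvParseCellGo rest layers (atoms ++ [String.ofList atom]) [] false
    else
      pvParseCellGo rest layers atoms (atom ++ [ch]) false

def pvParseCell (s : String) : List (List String) := pvParseCellGo s.toList [] [] [] true

def generate_trace_from_spec_alt (trace_spec : List (List String)) (grid_size : Int × Int) : List (List (List (List String))) :=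
  let rows : Int := grid_size.1
  let cols : Int := grid_size.2
  let trace_length : Int :=
    ((PySem.Str.count (PySem.List.pyGetD (PySem.List.pyGetD trace_spec 0 []) 0 "") ";" : Nat) : Int) + 1
  let parsed : List (List (List (List String))) :=
    (PySem.List.pyRange 0 rows).map (fun i =>
      (PySem.List.pyRange 0 cols).map (fun j =>
        pvParseCell (PySem.List.pyGetD (PySem.List.pyGetD trace_spec i []) j "")))
  (PySem.List.pyRange 0 trace_length).map (fun k =>
    (PySem.List.pyRange 0 rows).map (fun i =>
      (PySem.List.pyRange 0 cols).map (fun j =>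
        PySem.List.pyGetD (PySem.List.pyGetD (PySem.List.pyGetD parsed i []) j []) k [])))

-- ===== PRECONDITION & SPEC =====
-- Pre_ excludes exactly the inputs where Python A raises IndexError: an empty trace_spec or empty
-- first row (trace_spec[0][0]), a grid taller than trace_spec (only reachable when grid_size.2 > 0,
-- since the j-loop body performs all accesses), a row narrower than grid_size.2, or a visited cell
-- whose ';'-split is shorter than trace_length.
def Pre_generate_trace_from_spec (trace_spec : List (List String)) (grid_size : Int × Int) : Prop :=
  trace_spec ≠ [] ∧ trace_spec.headD [] ≠ [] ∧
  (0 < grid_size.2 → grid_size.1 ≤ (trace_spec.length : Int)) ∧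
  ∀ row ∈ trace_spec.take grid_size.1.toNat,
    grid_size.2 ≤ (row.length : Int) ∧
    ∀ s ∈ row.take grid_size.2.toNat,
      ((PySem.Str.split? ((trace_spec.headD []).headD "") ";").getD []).length
        ≤ ((PySem.Str.split? s ";").getD []).length
instance (trace_spec : List (List String)) (grid_size : Int × Int) : Decidable (Pre_generate_trace_from_spec trace_spec grid_size) := by unfold Pre_generate_trace_from_spec; infer_instance

def pvWitness_generate_trace_from_spec : List (List String) × (Int × Int) :=
  ([["a;b,c", ";x"], ["p,q;", "r;s"]], (2, 2))

def Spec_generate_trace_from_spec (trace_spec : List (List String)) (grid_size : Int × Int) (out : List (List (List (List String)))) : Prop := out = generate_trace_from_spec_alt trace_spec grid_size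
instance (trace_spec : List (List String)) (grid_size : Int × Int) (out : List (List (List (List String)))) : Decidable (Spec_generate_trace_from_spec trace_spec grid_size out) := by unfold Spec_generate_trace_from_spec; infer_instance

-- ===== CLAIM (what is proved, stated in full; the proofs are below) =====
def Claim_equal_generate_trace_from_spec : Prop := ∀ (trace_spec : List (List String)) (grid_size : Int × Int), Dom_generate_trace_from_spec trace_spec grid_size → Pre_generate_trace_from_spec trace_spec grid_size → Spec_generate_trace_from_spec trace_spec grid_size (generate_trace_from_spec trace_spec grid_size)

-- ===== LEMMAS AND PROOFS =====

-- the value A assigns to trace[k][i][j]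
def pvCell (trace_spec : List (List String)) (i j k : Int) : List String :=
  let pte := (PySem.Str.split? (PySem.List.pyGetD (PySem.List.pyGetD trace_spec i []) j "") ";").getD []
  if PySem.List.pyGetD pte k "" = "" then []
  else (PySem.Str.split? (PySem.List.pyGetD pte k "") ",").getD []

-- the common triple-map shape of both results
def pvTgt (L R C : Int) (e : Int → Int → Int → List String) : List (List (List (List String))) :=
  (PySem.List.pyRange 0 L).map (fun k =>
    (PySem.List.pyRange 0 R).map (fun i =>
      (PySem.List.pyRange 0 C).map (fun j => e k i j)))

lemma pvTgt_congr {L R C : Int} {e e' : Int → Int → Int → List String}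
    (h : ∀ k i j, 0 ≤ k → k < L → 0 ≤ i → i < R → 0 ≤ j → j < C → e k i j = e' k i j) :
    pvTgt L R C e = pvTgt L R C e' := by
  unfold pvTgt
  refine List.map_congr_left (fun k hk => ?_)
  rw [PySem.List.mem_pyRange_one] at hk
  refine List.map_congr_left (fun i hi => ?_)
  rw [PySem.List.mem_pyRange_one] at hi
  refine List.map_congr_left (fun j hj => ?_)
  rw [PySem.List.mem_pyRange_one] at hj
  exact h k i j hk.1 hk.2 hi.1 hi.2 hj.1 hj.2

lemma pv_set_map_pyRange {α : Type} (n m : Int) (g : Int → α) (hm : 0 ≤ m) (a : α) :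
    ((PySem.List.pyRange 0 n).map g).set m.toNat a
      = (PySem.List.pyRange 0 n).map (fun x => if x = m then a else g x) := by
  apply List.ext_getElem
  · simp
  · intro t h1 h2
    simp only [List.getElem_set, List.getElem_map, PySem.List.getElem_pyRange_one]
    have : (0 : Int) + t = t := by omega
    rw [this]
    by_cases hc : m.toNat = t
    · have : (t : Int) = m := by omega
      simp [hc, this]
    · have : ¬ ((t : Int) = m) := by omega
      simp [hc, this]

lemma pv_pyGetD_map_pyRange {α : Type} (n m : Int) (g : Int → α) (d : α)
    (h0 : 0 ≤ m) (h : m < n) :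
    PySem.List.pyGetD ((PySem.List.pyRange 0 n).map g) m d = g m := by
  have hlen : m.toNat < ((PySem.List.pyRange 0 n).map g).length := by
    simp [PySem.List.length_pyRange_one]; omega
  rw [PySem.List.pyGetD_of_nonneg _ _ h0]
  rw [List.getD_eq_getElem _ _ hlen]
  simp only [List.getElem_map, PySem.List.getElem_pyRange_one]
  congr 1
  omega

-- pyGetD through a map / past the end, for plain lists
lemma pv_pyGetD_map {α β : Type} (f : α → β) (l : List α) (k : Int) (d : β) (d' : α)
    (h0 : 0 ≤ k) (h : k.toNat < l.length) :
    PySem.List.pyGetD (l.map f) k d = f (PySem.List.pyGetD l k d') := by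
  rw [PySem.List.pyGetD_of_nonneg _ _ h0, PySem.List.pyGetD_of_nonneg _ _ h0]
  rw [List.getD_eq_getElem _ _ (by simpa using h), List.getD_eq_getElem _ _ h]
  simp

lemma pv_pyGetD_oob {α : Type} (l : List α) (k : Int) (d : α)
    (h0 : 0 ≤ k) (h : l.length ≤ k.toNat) :
    PySem.List.pyGetD l k d = d := by
  rw [PySem.List.pyGetD_of_nonneg _ _ h0]
  exact List.getD_eq_default _ _ h

-- generic suffix fold: if F advances T one step, folding the range [b, C) from T b lands at T (max b C)
lemma pv_foldl_step {α : Type} (C : Int) (F : α → Int → α) (T : Int → α)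
    (hF : ∀ j, 0 ≤ j → j < C → F (T j) j = T (j + 1)) :
    ∀ b : Int, 0 ≤ b → (PySem.List.pyRange b C).foldl F (T b) = T (max b C) := by
  intro b hb
  by_cases hbc : C ≤ b
  · rw [PySem.List.pyRange_one_eq_nil hbc]
    simp [max_eq_left hbc]
  · have hbc2 : b < C := by omega
    have hterm : (C - (b + 1)).toNat < (C - b).toNat := by omega
    rw [PySem.List.pyRange_one_cons hbc2]
    simp only [List.foldl_cons]
    rw [hF b hb hbc2]
    rw [pv_foldl_step C F T hF (b + 1) (by omega)]
    congr 1
    omega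
termination_by b _ => (C - b).toNat

-- one in-place cell write on a grid in triple-map form
lemma pv_grid_upd (R C : Int) (e2 : Int → Int → List String) (i j : Int)
    (hi : 0 ≤ i) (hiR : i < R) (hj : 0 ≤ j) (v : List String) :
    ((PySem.List.pyRange 0 R).map (fun x => (PySem.List.pyRange 0 C).map (fun y => e2 x y))).set i.toNat
      ((PySem.List.pyGetD ((PySem.List.pyRange 0 R).map (fun x => (PySem.List.pyRange 0 C).map (fun y => e2 x y))) i []).set j.toNat v)
    = (PySem.List.pyRange 0 R).map (fun x =>
        (PySem.List.pyRange 0 C).map (fun y => if x = i ∧ y = j then v else e2 x y)) := by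
  rw [pv_pyGetD_map_pyRange R i _ _ hi hiR]
  rw [pv_set_map_pyRange C j (fun y => e2 i y) hj v]
  rw [pv_set_map_pyRange R i _ hi _]
  refine List.map_congr_left (fun x hx => ?_)
  by_cases hxi : x = i
  · subst hxi
    rw [if_pos rfl]
    refine List.map_congr_left (fun y hy => ?_)
    by_cases hyj : y = j <;> simp [hyj]
  · simp only [if_neg hxi]
    refine List.map_congr_left (fun y hy => ?_)
    have : ¬ (x = i ∧ y = j) := fun h => hxi h.1
    simp [this]

-- the k-loop: writing layer k for every k in [m, L) on a layer list in map form
lemma pv_kfold {α : Type} (L : Int) (d : α) (g g' : Int → α) (u : α → Int → α)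
    (hu : ∀ k, 0 ≤ k → k < L → u (g k) k = g' k) :
    ∀ m : Int, 0 ≤ m →
      (PySem.List.pyRange m L).foldl
          (fun tr k => tr.set k.toNat (u (PySem.List.pyGetD tr k d) k))
          ((PySem.List.pyRange 0 L).map (fun x => if x < m then g' x else g x))
        = (PySem.List.pyRange 0 L).map g' := by
  intro m hm
  by_cases hml : L ≤ m
  · rw [PySem.List.pyRange_one_eq_nil hml]
    simp only [List.foldl_nil]
    refine List.map_congr_left (fun x hx => ?_)
    rw [PySem.List.mem_pyRange_one] at hx
    simp only [if_pos (by omega : x < m)]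
  · have hml2 : m < L := by omega
    have hterm : (L - (m + 1)).toNat < (L - m).toNat := by omega
    rw [PySem.List.pyRange_one_cons hml2]
    simp only [List.foldl_cons]
    rw [pv_pyGetD_map_pyRange L m _ d hm hml2]
    simp only [if_neg (by omega : ¬ m < m)]
    rw [hu m hm hml2]
    rw [pv_set_map_pyRange L m _ hm _]
    have hstep : ((PySem.List.pyRange 0 L).map
        (fun x => if x = m then g' m else if x < m then g' x else g x))
      = (PySem.List.pyRange 0 L).map (fun x => if x < m + 1 then g' x else g x) := by
      refine List.map_congr_left (fun x hx => ?_)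
      by_cases hxm : x = m
      · rw [if_pos hxm, hxm, if_pos (by omega : m < m + 1)]
      · by_cases hlt : x < m
        · rw [if_neg hxm, if_pos hlt, if_pos (by omega : x < m + 1)]
        · rw [if_neg hxm, if_neg hlt, if_neg (by omega : ¬ x < m + 1)]
    rw [hstep]
    exact pv_kfold L d g g' u hu (m + 1) (by omega)
termination_by m _ => (L - m).toNat

-- abbreviation: A's trace_length
def pvL (ts : List (List String)) : Int :=
  (((PySem.Str.split? (PySem.List.pyGetD (PySem.List.pyGetD ts 0 []) 0 "") ";").getD []).length : Int)

-- row-progress and cell-progress entry functions for A's loop invariants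
def pvEi (ts : List (List String)) (a k x y : Int) : List String :=
  if x < a then pvCell ts x y k else []
def pvEj (ts : List (List String)) (i b k x y : Int) : List String :=
  if x = i ∧ y < b then pvCell ts i y k else if x < i then pvCell ts x y k else []

-- A's inner j-loop body advances the pvEj invariant one column
set_option maxHeartbeats 1600000 in
lemma pv_jstep (ts : List (List String)) (gs : Int × Int) (i : Int)
    (hi0 : 0 ≤ i) (hiR : i < gs.1) (j : Int) (hj0 : 0 ≤ j) (hjC : j < gs.2) :
    (PySem.List.pyRange 0 (pvL ts)).foldl (fun tr k =>
        let v : List String :=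
          if PySem.List.pyGetD ((PySem.Str.split? (PySem.List.pyGetD (PySem.List.pyGetD ts i []) j "") ";").getD []) k "" = "" then []
          else (PySem.Str.split? (PySem.List.pyGetD ((PySem.Str.split? (PySem.List.pyGetD (PySem.List.pyGetD ts i []) j "") ";").getD []) k "") ",").getD []
        tr.set k.toNat ((PySem.List.pyGetD tr k []).set i.toNat
          ((PySem.List.pyGetD (PySem.List.pyGetD tr k []) i []).set j.toNat v)))
      (pvTgt (pvL ts) gs.1 gs.2 (pvEj ts i j))
    = pvTgt (pvL ts) gs.1 gs.2 (pvEj ts i (j + 1)) := by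
  have hinit : pvTgt (pvL ts) gs.1 gs.2 (pvEj ts i j)
      = (PySem.List.pyRange 0 (pvL ts)).map (fun k =>
          if k < 0 then
            (PySem.List.pyRange 0 gs.1).map (fun x => (PySem.List.pyRange 0 gs.2).map (fun y => pvEj ts i (j + 1) k x y))
          else
            (PySem.List.pyRange 0 gs.1).map (fun x => (PySem.List.pyRange 0 gs.2).map (fun y => pvEj ts i j k x y))) := by
    unfold pvTgt
    refine List.map_congr_left (fun k hk => ?_)
    rw [PySem.List.mem_pyRange_one] at hk
    rw [if_neg (by omega : ¬ k < 0)]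
  rw [hinit]
  refine pv_kfold (pvL ts) ([] : List (List (List String)))
      (fun k => (PySem.List.pyRange 0 gs.1).map (fun x => (PySem.List.pyRange 0 gs.2).map (fun y => pvEj ts i j k x y)))
      (fun k => (PySem.List.pyRange 0 gs.1).map (fun x => (PySem.List.pyRange 0 gs.2).map (fun y => pvEj ts i (j + 1) k x y)))
      (fun grd k => grd.set i.toNat ((PySem.List.pyGetD grd i []).set j.toNat
        (if PySem.List.pyGetD ((PySem.Str.split? (PySem.List.pyGetD (PySem.List.pyGetD ts i []) j "") ";").getD []) k "" = "" then []
         else (PySem.Str.split? (PySem.List.pyGetD ((PySem.Str.split? (PySem.List.pyGetD (PySem.List.pyGetD ts i []) j "") ";").getD []) k "") ",").getD [])))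
      ?_ 0 le_rfl
  intro k hk0 hkL
  beta_reduce
  rw [pv_grid_upd gs.1 gs.2 (fun x y => pvEj ts i j k x y) i j hi0 hiR hj0 _]
  refine List.map_congr_left (fun x hx => ?_)
  refine List.map_congr_left (fun y hy => ?_)
  rw [PySem.List.mem_pyRange_one] at hx hy
  by_cases hxy : x = i ∧ y = j
  · obtain ⟨hxi, hyj⟩ := hxy
    subst hxi; subst hyj
    rw [if_pos (⟨rfl, rfl⟩ : x = x ∧ y = y)]
    unfold pvEj
    rw [if_pos (⟨rfl, by omega⟩ : x = x ∧ y < y + 1)]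
    rfl
  · rw [if_neg hxy]
    unfold pvEj
    by_cases h1 : x = i ∧ y < j
    · rw [if_pos h1, if_pos (⟨h1.1, by omega⟩ : x = i ∧ y < j + 1)]
    · rw [if_neg h1]
      have h2 : ¬ (x = i ∧ y < j + 1) := by
        rintro ⟨hxi, hyj⟩
        exact hxy ⟨hxi, by omega⟩
      rw [if_neg h2]

-- A's outer i-loop body advances the pvEi invariant one row
set_option maxHeartbeats 1600000 in
lemma pv_istep (ts : List (List String)) (gs : Int × Int) (i : Int)
    (hi0 : 0 ≤ i) (hiR : i < gs.1) :
    (PySem.List.pyRange 0 gs.2).foldl (fun tr j =>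
        (PySem.List.pyRange 0 (pvL ts)).foldl (fun tr k =>
          let v : List String :=
            if PySem.List.pyGetD ((PySem.Str.split? (PySem.List.pyGetD (PySem.List.pyGetD ts i []) j "") ";").getD []) k "" = "" then []
            else (PySem.Str.split? (PySem.List.pyGetD ((PySem.Str.split? (PySem.List.pyGetD (PySem.List.pyGetD ts i []) j "") ";").getD []) k "") ",").getD []
          tr.set k.toNat ((PySem.List.pyGetD tr k []).set i.toNat
            ((PySem.List.pyGetD (PySem.List.pyGetD tr k []) i []).set j.toNat v))) tr)
      (pvTgt (pvL ts) gs.1 gs.2 (pvEi ts i))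
    = pvTgt (pvL ts) gs.1 gs.2 (pvEi ts (i + 1)) := by
  have h0 : pvTgt (pvL ts) gs.1 gs.2 (pvEi ts i) = pvTgt (pvL ts) gs.1 gs.2 (pvEj ts i 0) := by
    refine pvTgt_congr ?_
    intro k x y _ _ _ _ hy0 _
    unfold pvEi pvEj
    rw [if_neg (by omega : ¬ (x = i ∧ y < 0))]
  rw [h0]
  have hstep := pv_foldl_step gs.2
      (fun tr j =>
        (PySem.List.pyRange 0 (pvL ts)).foldl (fun tr k =>
          let v : List String :=
            if PySem.List.pyGetD ((PySem.Str.split? (PySem.List.pyGetD (PySem.List.pyGetD ts i []) j "") ";").getD []) k "" = "" then []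
            else (PySem.Str.split? (PySem.List.pyGetD ((PySem.Str.split? (PySem.List.pyGetD (PySem.List.pyGetD ts i []) j "") ";").getD []) k "") ",").getD []
          tr.set k.toNat ((PySem.List.pyGetD tr k []).set i.toNat
            ((PySem.List.pyGetD (PySem.List.pyGetD tr k []) i []).set j.toNat v))) tr)
      (fun b => pvTgt (pvL ts) gs.1 gs.2 (pvEj ts i b))
      (fun j hj0 hjC => pv_jstep ts gs i hi0 hiR j hj0 hjC) 0 le_rfl
  rw [hstep]
  refine pvTgt_congr ?_
  intro k x y _ _ hx0 hxR hy0 hyC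
  unfold pvEj pvEi
  by_cases hxi : x = i
  · subst hxi
    rw [if_pos ⟨rfl, by omega⟩, if_pos (by omega : x < x + 1)]
  · have h1 : ¬ (x = i ∧ y < max 0 gs.2) := fun h => hxi h.1
    rw [if_neg h1]
    by_cases h2 : x < i
    · rw [if_pos h2, if_pos (by omega : x < i + 1)]
    · rw [if_neg h2, if_neg (by omega : ¬ x < i + 1)]

-- ===== the B side: the character scanner equals split-twice =====

-- functional single-separator split (the specification both sides are reduced to)
def pvSplit1 (c : Char) : List Char → List Char → List (List Char)
  | [], cur => [cur]
  | d :: rest, cur => if d = c then cur :: pvSplit1 c rest [] else pvSplit1 c rest (cur ++ [d])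

def pvSegTop (seg : List Char) : List String :=
  if seg = [] then [] else (pvSplit1 ',' seg []).map String.ofList

lemma pvSplit1_ne_nil (c : Char) (l cur : List Char) : pvSplit1 c l cur ≠ [] := by
  induction l generalizing cur with
  | nil => simp [pvSplit1]
  | cons d rest ih =>
    by_cases hdc : d = c <;> simp [pvSplit1, hdc, ih]

lemma pvSplit1_shift (c : Char) : ∀ (l cur : List Char),
    pvSplit1 c l cur = List.modifyHead (cur ++ ·) (pvSplit1 c l []) := by
  intro l
  induction l with
  | nil => intro cur; simp [pvSplit1]
  | cons d rest ih =>
    intro cur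
    by_cases hdc : d = c
    · simp [pvSplit1, hdc]
    · simp only [pvSplit1, if_neg hdc, List.nil_append]
      rw [ih (cur ++ [d]), ih [d]]
      cases h : pvSplit1 c rest [] with
      | nil => exact absurd h (pvSplit1_ne_nil c rest [])
      | cons a t => simp

lemma pv_splitOn_go (c : Char) : ∀ (l : List Char) (fuel : Nat) (cur : List Char) (acc : List (List Char)),
    l.length ≤ fuel →
    PySem.Chars.splitOn.go [c] fuel l cur acc = acc.reverse ++ pvSplit1 c l cur.reverse := by
  intro l
  induction l with
  | nil =>
    intro fuel cur acc _
    cases fuel <;> simp [PySem.Chars.splitOn.go, pvSplit1]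
  | cons d rest ih =>
    intro fuel cur acc h
    cases fuel with
    | zero => simp at h
    | succ f =>
      rw [PySem.Chars.splitOn.go]
      by_cases hdc : d = c
      · subst hdc
        have hpre : [d].isPrefixOf (d :: rest) = true := by simp [List.isPrefixOf]
        have hd : List.drop [d].length (d :: rest) = rest := by simp
        rw [if_pos hpre, hd]
        rw [ih f [] (cur.reverse :: acc) (by simpa using h)]
        simp [pvSplit1]
      · have hpre : [c].isPrefixOf (d :: rest) = false := by
          simp [List.isPrefixOf]; exact fun h' => hdc h'.symm
        rw [if_neg (by simp [hpre])]
        rw [ih f (d :: cur) acc (by simpa using h)]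
        simp [pvSplit1, hdc]

lemma pv_splitOn_eq (c : Char) (l : List Char) :
    PySem.Chars.splitOn l [c] = pvSplit1 c l [] := by
  unfold PySem.Chars.splitOn
  rw [pv_splitOn_go c l (l.length + 1) [] [] (by omega)]
  simp

lemma pv_count_go (c : Char) : ∀ (l : List Char) (fuel : Nat) (acc : Nat),
    l.length ≤ fuel →
    PySem.Chars.count.go [c] fuel l acc = acc + l.count c := by
  intro l
  induction l with
  | nil => intro fuel acc _; cases fuel <;> simp [PySem.Chars.count.go]
  | cons d rest ih =>
    intro fuel acc h
    cases fuel with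
    | zero => simp at h
    | succ f =>
      rw [PySem.Chars.count.go]
      by_cases hdc : d = c
      · subst hdc
        have hpre : [d].isPrefixOf (d :: rest) = true := by simp [List.isPrefixOf]
        have hd : List.drop [d].length (d :: rest) = rest := by simp
        rw [if_pos hpre, hd]
        rw [ih f (acc + 1) (by simpa using h)]
        simp [List.count_cons]; omega
      · have hpre : [c].isPrefixOf (d :: rest) = false := by
          simp [List.isPrefixOf]; exact fun h' => hdc h'.symm
        rw [if_neg (by simp [hpre])]
        rw [ih f acc (by simpa using h)]
        simp [List.count_cons, hdc]

lemma pv_count_eq (c : Char) (l : List Char) :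
    PySem.Chars.count l [c] = l.count c := by
  unfold PySem.Chars.count
  rw [if_neg (by simp)]
  simpa using pv_count_go c l l.length 0 (le_refl _)

lemma pv_split1_length (c : Char) : ∀ (l cur : List Char),
    (pvSplit1 c l cur).length = l.count c + 1 := by
  intro l
  induction l with
  | nil => intro cur; simp [pvSplit1]
  | cons d rest ih =>
    intro cur
    by_cases hdc : d = c
    · subst hdc; simp [pvSplit1, ih, List.count_cons]
    · simp [pvSplit1, hdc, ih, List.count_cons]

-- invariant of the scanner: the pending state (atoms, atom, empty) continues the first
-- ';'-segment; the remaining segments are processed from scratch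
lemma pvParseGo_inv : ∀ (l : List Char) (L : List (List String)) (A : List String)
    (t : List Char) (e : Bool),
    pvParseCellGo l L A t e =
      L ++ ((if e ∧ (pvSplit1 ';' l []).headI = [] then []
             else A ++ (pvSplit1 ',' ((pvSplit1 ';' l []).headI) t).map String.ofList)
            :: ((pvSplit1 ';' l []).tail).map pvSegTop) := by
  intro l
  induction l with
  | nil =>
    intro L A t e
    cases e <;> simp [pvParseCellGo, pvSplit1]
  | cons ch rest ih =>
    intro L A t e
    by_cases h1 : ch = ';'
    · subst h1
      simp only [pvParseCellGo, if_pos rfl]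
      rw [ih]
      have hsp : pvSplit1 ';' (';' :: rest) [] = [] :: pvSplit1 ';' rest [] := by
        simp [pvSplit1]
      rw [hsp]
      cases hr : pvSplit1 ';' rest [] with
      | nil => exact absurd hr (pvSplit1_ne_nil ';' rest [])
      | cons s0 tl =>
        simp only [List.headI, List.tail, List.map_cons, List.append_assoc, List.cons_append,
          List.nil_append]
        cases e <;> simp [pvSegTop, pvSplit1]
    · by_cases h2 : ch = ','
      · subst h2
        simp only [pvParseCellGo, if_neg h1, if_pos rfl]
        rw [ih]
        have hsp : pvSplit1 ';' (',' :: rest) [] =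
            List.modifyHead ([','] ++ ·) (pvSplit1 ';' rest []) := by
          simp only [pvSplit1, if_neg h1, List.nil_append]
          rw [pvSplit1_shift ';' rest [',']]
        rw [hsp]
        cases hr : pvSplit1 ';' rest [] with
        | nil => exact absurd hr (pvSplit1_ne_nil ';' rest [])
        | cons s0 tl =>
          simp only [List.modifyHead, List.headI, List.tail, List.singleton_append]
          have hcomma : pvSplit1 ',' (',' :: s0) t = t :: pvSplit1 ',' s0 [] := by
            simp [pvSplit1]
          rw [hcomma]
          cases e <;> simp [List.map_cons]
      · simp only [pvParseCellGo, if_neg h1, if_neg h2]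
        rw [ih]
        have hsp : pvSplit1 ';' (ch :: rest) [] =
            List.modifyHead ([ch] ++ ·) (pvSplit1 ';' rest []) := by
          simp only [pvSplit1, if_neg h1, List.nil_append]
          rw [pvSplit1_shift ';' rest [ch]]
        rw [hsp]
        cases hr : pvSplit1 ';' rest [] with
        | nil => exact absurd hr (pvSplit1_ne_nil ';' rest [])
        | cons s0 tl =>
          simp only [List.modifyHead, List.headI, List.tail, List.singleton_append]
          have hch : pvSplit1 ',' (ch :: s0) t = pvSplit1 ',' s0 (t ++ [ch]) := by
            simp [pvSplit1, h2]
          rw [hch]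
          cases e <;> simp

lemma pvParseCell_eq_segs (s : String) :
    pvParseCell s = (pvSplit1 ';' s.toList []).map pvSegTop := by
  unfold pvParseCell
  rw [pvParseGo_inv]
  cases hr : pvSplit1 ';' s.toList [] with
  | nil => exact absurd hr (pvSplit1_ne_nil ';' s.toList [])
  | cons s0 tl =>
    simp only [List.headI, List.tail, List.nil_append, List.map_cons]
    by_cases hs0 : s0 = []
    · subst hs0; simp [pvSegTop]
    · simp [pvSegTop, hs0]

-- the Python split bridges
lemma pv_split_semi (s : String) :
    (PySem.Str.split? s ";").getD [] = (pvSplit1 ';' s.toList []).map String.ofList := by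
  have h : (";" : String).toList = [';'] := rfl
  simp [PySem.Str.split?, PySem.Chars.split?, h, pv_splitOn_eq]

lemma pv_split_comma (s : String) :
    (PySem.Str.split? s ",").getD [] = (pvSplit1 ',' s.toList []).map String.ofList := by
  have h : ("," : String).toList = [','] := rfl
  simp [PySem.Str.split?, PySem.Chars.split?, h, pv_splitOn_eq]

-- B's scanner computes exactly A's per-cell "split twice" values
lemma pvParseCell_eq (s : String) :
    pvParseCell s = ((PySem.Str.split? s ";").getD []).map
      (fun seg => if seg = "" then [] else (PySem.Str.split? seg ",").getD []) := by
  rw [pvParseCell_eq_segs, pv_split_semi, List.map_map]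
  refine List.map_congr_left (fun seg _ => ?_)
  simp only [Function.comp]
  by_cases hseg : seg = []
  · subst hseg; simp [pvSegTop]
  · have hne : String.ofList seg ≠ "" := by
      intro h
      have := congrArg String.toList h
      simp at this
      exact hseg this
    rw [pvSegTop, if_neg hseg, if_neg hne, pv_split_comma]
    congr 1
    simp

-- B's trace_length equals A's
lemma pv_len_eq (s : String) :
    ((PySem.Str.count s ";" : Nat) : Int) + 1
      = (((PySem.Str.split? s ";").getD []).length : Int) := by
  rw [pv_split_semi]
  have h : (";" : String).toList = [';'] := rfl
  simp [PySem.Str.count, h, pv_count_eq, pv_split1_length]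

set_option maxHeartbeats 1600000 in
theorem pv_main (trace_spec : List (List String)) (grid_size : Int × Int) :
    generate_trace_from_spec trace_spec grid_size
      = generate_trace_from_spec_alt trace_spec grid_size := by
  -- A in closed form
  have hA : generate_trace_from_spec trace_spec grid_size
      = pvTgt (pvL trace_spec) grid_size.1 grid_size.2 (pvEi trace_spec (max 0 grid_size.1)) := by
    show (PySem.List.pyRange 0 grid_size.1).foldl (fun tr i =>
        (PySem.List.pyRange 0 grid_size.2).foldl (fun tr j =>
          (PySem.List.pyRange 0 (pvL trace_spec)).foldl (fun tr k =>
            let v : List String :=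
              if PySem.List.pyGetD ((PySem.Str.split? (PySem.List.pyGetD (PySem.List.pyGetD trace_spec i []) j "") ";").getD []) k "" = "" then []
              else (PySem.Str.split? (PySem.List.pyGetD ((PySem.Str.split? (PySem.List.pyGetD (PySem.List.pyGetD trace_spec i []) j "") ";").getD []) k "") ",").getD []
            tr.set k.toNat ((PySem.List.pyGetD tr k []).set i.toNat
              ((PySem.List.pyGetD (PySem.List.pyGetD tr k []) i []).set j.toNat v))) tr) tr)
        ((PySem.List.pyRange 0 (pvL trace_spec)).map (fun _ =>
          (PySem.List.pyRange 0 grid_size.1).map (fun _ =>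
            (PySem.List.pyRange 0 grid_size.2).map (fun _ => ([] : List String)))))
      = pvTgt (pvL trace_spec) grid_size.1 grid_size.2 (pvEi trace_spec (max 0 grid_size.1))
    have h0 : ((PySem.List.pyRange 0 (pvL trace_spec)).map (fun _ =>
          (PySem.List.pyRange 0 grid_size.1).map (fun _ =>
            (PySem.List.pyRange 0 grid_size.2).map (fun _ => ([] : List String)))))
        = pvTgt (pvL trace_spec) grid_size.1 grid_size.2 (pvEi trace_spec 0) := by
      unfold pvTgt
      refine List.map_congr_left (fun k hk => ?_)
      refine List.map_congr_left (fun x hx => ?_)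
      refine List.map_congr_left (fun y hy => ?_)
      rw [PySem.List.mem_pyRange_one] at hx
      unfold pvEi
      rw [if_neg (by omega : ¬ x < 0)]
    rw [h0]
    exact pv_foldl_step grid_size.1 _
      (fun a => pvTgt (pvL trace_spec) grid_size.1 grid_size.2 (pvEi trace_spec a))
      (fun i hi0 hiR => pv_istep trace_spec grid_size i hi0 hiR) 0 le_rfl
  -- B in closed form
  have hB : generate_trace_from_spec_alt trace_spec grid_size
      = pvTgt (pvL trace_spec) grid_size.1 grid_size.2 (pvEi trace_spec (max 0 grid_size.1)) := by
    show (PySem.List.pyRange 0 (((PySem.Str.count (PySem.List.pyGetD (PySem.List.pyGetD trace_spec 0 []) 0 "") ";" : Nat) : Int) + 1)).map (fun k =>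
        (PySem.List.pyRange 0 grid_size.1).map (fun i =>
          (PySem.List.pyRange 0 grid_size.2).map (fun j =>
            PySem.List.pyGetD (PySem.List.pyGetD (PySem.List.pyGetD
              ((PySem.List.pyRange 0 grid_size.1).map (fun i =>
                (PySem.List.pyRange 0 grid_size.2).map (fun j =>
                  pvParseCell (PySem.List.pyGetD (PySem.List.pyGetD trace_spec i []) j "")))) i []) j []) k []))) = _
    rw [pv_len_eq]
    refine Eq.trans (b := pvTgt (pvL trace_spec) grid_size.1 grid_size.2 (fun k i j =>
        PySem.List.pyGetD (PySem.List.pyGetD (PySem.List.pyGetD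
          ((PySem.List.pyRange 0 grid_size.1).map (fun i =>
            (PySem.List.pyRange 0 grid_size.2).map (fun j =>
              pvParseCell (PySem.List.pyGetD (PySem.List.pyGetD trace_spec i []) j "")))) i []) j []) k [])) rfl ?_
    refine pvTgt_congr ?_
    intro k i j hk0 hkL hi0 hiR hj0 hjC
    rw [pv_pyGetD_map_pyRange grid_size.1 i _ _ hi0 hiR]
    rw [pv_pyGetD_map_pyRange grid_size.2 j _ _ hj0 hjC]
    rw [pvParseCell_eq]
    unfold pvEi
    rw [if_pos (by omega : i < max 0 grid_size.1)]
    simp only [pvCell]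
    set pte := (PySem.Str.split? (PySem.List.pyGetD (PySem.List.pyGetD trace_spec i []) j "") ";").getD [] with hpte
    by_cases hin : k.toNat < pte.length
    · rw [pv_pyGetD_map _ pte k [] "" hk0 hin]
    · have hoob : pte.length ≤ k.toNat := by omega
      rw [pv_pyGetD_oob _ k [] hk0 (by simpa using hoob)]
      rw [pv_pyGetD_oob pte k "" hk0 hoob]
      simp
  rw [hA, hB]

-- ===== VERDICT (by name: the statement is the Claim_ definition above) =====
theorem generate_trace_from_spec_spec : Claim_equal_generate_trace_from_spec := by
  intro ts gs _ _
  exact pv_main ts gs
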